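-- pv_equiv track=rewrite | github.com/yactam/EA4 | TP2/tp2_ex2.py | puissance_matrice_2_2_ops
-- ===== SOURCE A (Python) =====
-- def produit_matrice_2_2_ops (M1, M2) :
--   ''' produit_matrice_2_2 avec calcul du nombre d'opérations arithmétiques'''
--   res = [ [0, 0], [0, 0] ]
--
--   res[0][0] = M1[0][0] * M2[0][0] + M1[0][1] * M2[1][0]
--   res[1][0] = M1[1][0] * M2[0][0] + M1[1][1] * M2[1][0]
--   res[0][1] = M1[0][0] * M2[0][1] + M1[0][1] * M2[1][1]
--   res[1][1] = M1[1][0] * M2[0][1] + M1[1][1] * M2[1][1]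
--
--   return res, 12
--
-- def puissance_matrice_2_2_ops (M, n) :
--   ''' puissance_matrice_2_2 avec calcul du nombre d'opérations arithmétiques'''
--   if n == 0: return [[1, 0], [0, 1]], 0
--   if n == 1: return M, 0
--   else:
--     tmp, ops_puis = puissance_matrice_2_2_ops(M, n//2)
--     carre, ops_prod = produit_matrice_2_2_ops(tmp, tmp)
--     if n % 2 == 0:
--       return carre, (ops_puis+ops_prod)
--     else:
--       res, ops_prod2 = produit_matrice_2_2_ops(carre, M)
--       return res, (ops_prod2 + ops_prod + ops_puis)
-- ===== SOURCE B (Python) =====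
-- def _mul2_ops(A, B):
--     '''2x2 product, returned with its cost of 12 arithmetic operations'''
--     a, b = A[0][0], A[0][1]
--     c, d = A[1][0], A[1][1]
--     e, f = B[0][0], B[0][1]
--     g, h = B[1][0], B[1][1]
--     return [[a * e + b * g, a * f + b * h], [c * e + d * g, c * f + d * h]], 12
--
-- def puissance_matrice_2_2_ops(M, n):
--     '''iterative MSB-first binary exponentiation with operation count'''
--     if n == 0:
--         return [[1, 0], [0, 1]], 0
--     result, ops = M, 0
--     for bit in bin(n)[3:]:
--         result, p = _mul2_ops(result, result)
--         ops += p
--         if bit == '1':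
--             result, p = _mul2_ops(result, M)
--             ops += p
--     return result, ops
-- ===== Notes on version B (the rewrite author's own statement) =====
-- stated objective: alternative
-- what changed: Replaces A's top-down recursion on n//2 with an iterative MSB-first binary-exponentiation loop over the bits of bin(n)[3:], squaring the accumulator and multiplying by M on 1-bits while summing the 12-operation cost of each product.
import Mathlib
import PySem

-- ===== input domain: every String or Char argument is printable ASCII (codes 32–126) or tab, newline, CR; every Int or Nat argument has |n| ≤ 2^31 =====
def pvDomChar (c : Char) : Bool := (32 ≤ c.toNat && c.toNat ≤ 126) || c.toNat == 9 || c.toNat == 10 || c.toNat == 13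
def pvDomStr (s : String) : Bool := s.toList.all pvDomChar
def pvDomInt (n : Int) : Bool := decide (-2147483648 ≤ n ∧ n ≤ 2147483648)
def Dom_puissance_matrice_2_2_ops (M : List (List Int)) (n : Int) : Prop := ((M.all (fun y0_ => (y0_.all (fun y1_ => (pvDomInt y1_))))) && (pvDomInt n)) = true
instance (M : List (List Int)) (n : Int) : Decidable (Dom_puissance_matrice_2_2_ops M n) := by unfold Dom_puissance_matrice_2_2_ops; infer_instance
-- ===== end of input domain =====

-- B replaces A's top-down recursion by an iterative MSB-first binary-exponentiation loop over bin(n)[3:] (alternative decomposition, same cost).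

-- M[i][j]: total wrapper over pyGet?; within Pre_ every index used is in range, so the default is never taken.
def pvIdx (X : List (List Int)) (i j : Int) : Int :=
  (PySem.List.pyGet? ((PySem.List.pyGet? X i).getD []) j).getD 0

-- ===== PORT A =====
def produit_matrice_2_2_ops (M1 M2 : List (List Int)) : List (List Int) × Int :=
  let r00 := pvIdx M1 0 0 * pvIdx M2 0 0 + pvIdx M1 0 1 * pvIdx M2 1 0
  let r10 := pvIdx M1 1 0 * pvIdx M2 0 0 + pvIdx M1 1 1 * pvIdx M2 1 0
  let r01 := pvIdx M1 0 0 * pvIdx M2 0 1 + pvIdx M1 0 1 * pvIdx M2 1 1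
  let r11 := pvIdx M1 1 0 * pvIdx M2 0 1 + pvIdx M1 1 1 * pvIdx M2 1 1
  ([[r00, r01], [r10, r11]], 12)

def puissance_matrice_2_2_ops (M : List (List Int)) (n : Int) : List (List Int) × Int :=
  if n = 0 then ([[1, 0], [0, 1]], 0)
  else if n = 1 then (M, 0)
  else if n < 0 then ([[1, 0], [0, 1]], 0)  -- totality guard: Python A never returns here (infinite recursion); excluded by Pre_
  else
    let p := puissance_matrice_2_2_ops M (PySem.Int.floordiv n 2)
    let c := produit_matrice_2_2_ops p.1 p.1
    if PySem.Int.mod n 2 = 0 then (c.1, p.2 + c.2)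
    else
      let r := produit_matrice_2_2_ops c.1 M
      (r.1, r.2 + c.2 + p.2)
termination_by n.toNat
decreasing_by
  simp only [PySem.Int.floordiv_eq_ediv_of_pos (by omega : (0:Int) < 2)]
  omega

-- ===== PORT B =====
def pvMul2Ops (A B : List (List Int)) : List (List Int) × Int :=
  let a := pvIdx A 0 0
  let b := pvIdx A 0 1
  let c := pvIdx A 1 0
  let d := pvIdx A 1 1
  let e := pvIdx B 0 0
  let f := pvIdx B 0 1
  let g := pvIdx B 1 0
  let h := pvIdx B 1 1
  ([[a * e + b * g, a * f + b * h], [c * e + d * g, c * f + d * h]], 12)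

-- body of Source B's for-loop over the characters of bin(n)[3:]
def pvStep (M : List (List Int)) (s : List (List Int) × Int) (bit : Char) : List (List Int) × Int :=
  let q := pvMul2Ops s.1 s.1
  let s1 := (q.1, s.2 + q.2)
  if bit = '1' then
    let r := pvMul2Ops s1.1 M
    (r.1, s1.2 + r.2)
  else s1

def puissance_matrice_2_2_ops_alt (M : List (List Int)) (n : Int) : List (List Int) × Int :=
  if n = 0 then ([[1, 0], [0, 1]], 0)
  else (PySem.List.slice (PySem.Int.toBinChars0b n) (some 3) none).foldl (pvStep M) (M, 0)

-- ===== PRECONDITION & SPEC =====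
-- Pre_ excludes exactly the inputs on which Python A raises: n < 0 (the recursion on n//2 never
-- reaches the base cases → RecursionError) and n ≥ 2 with M lacking a 2×2 top-left block (IndexError).
def Pre_puissance_matrice_2_2_ops (M : List (List Int)) (n : Int) : Prop :=
  0 ≤ n ∧ (n ≤ 1 ∨ (2 ≤ M.length ∧ 2 ≤ (M.getD 0 []).length ∧ 2 ≤ (M.getD 1 []).length))
instance (M : List (List Int)) (n : Int) : Decidable (Pre_puissance_matrice_2_2_ops M n) := by unfold Pre_puissance_matrice_2_2_ops; infer_instance

def pvWitness_puissance_matrice_2_2_ops : List (List Int) × Int := ([[1, 2], [3, 4]], 5)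

def Spec_puissance_matrice_2_2_ops (M : List (List Int)) (n : Int) (out : List (List Int) × Int) : Prop := out = puissance_matrice_2_2_ops_alt M n
instance (M : List (List Int)) (n : Int) (out : List (List Int) × Int) : Decidable (Spec_puissance_matrice_2_2_ops M n out) := by unfold Spec_puissance_matrice_2_2_ops; infer_instance

-- ===== CLAIM (what is proved, stated in full; the proofs are below) =====
def Claim_equal_puissance_matrice_2_2_ops : Prop := ∀ (M : List (List Int)) (n : Int), Dom_puissance_matrice_2_2_ops M n → Pre_puissance_matrice_2_2_ops M n → Spec_puissance_matrice_2_2_ops M n (puissance_matrice_2_2_ops M n)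

-- ===== LEMMAS AND PROOFS =====

lemma toDigitsCore_acc (fuel n : Nat) (ds : List Char) :
    Nat.toDigitsCore 2 fuel n ds = Nat.toDigitsCore 2 fuel n [] ++ ds := by
  induction fuel generalizing n ds with
  | zero => simp [Nat.toDigitsCore]
  | succ fuel ih =>
    simp only [Nat.toDigitsCore]
    by_cases h : n / 2 = 0
    · simp [h]
    · simp only [h, if_false]
      rw [ih (n / 2) _, ih (n / 2) [_]]
      simp

lemma toDigitsCore_fuel (fuel fuel' n : Nat) (h : n < fuel) (h' : n < fuel') :
    Nat.toDigitsCore 2 fuel n [] = Nat.toDigitsCore 2 fuel' n [] := by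
  induction fuel generalizing fuel' n with
  | zero => omega
  | succ fuel ih =>
    cases fuel' with
    | zero => omega
    | succ fuel' =>
      simp only [Nat.toDigitsCore]
      by_cases h0 : n / 2 = 0
      · simp [h0]
      · simp only [h0, if_false]
        rw [toDigitsCore_acc fuel, toDigitsCore_acc fuel']
        rw [ih fuel' (n / 2) (by omega) (by omega)]

lemma toDigits_two_rec (n : Nat) (h : 2 ≤ n) :
    Nat.toDigits 2 n = Nat.toDigits 2 (n / 2) ++ [Nat.digitChar (n % 2)] := by
  unfold Nat.toDigits
  conv_lhs => rw [Nat.toDigitsCore]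
  have h0 : ¬ n / 2 = 0 := by omega
  simp only [h0, if_false]
  rw [toDigitsCore_acc, toDigitsCore_fuel n (n / 2 + 1) (n / 2) (by omega) (by omega)]

lemma toDigits_two_length_pos (n : Nat) : 1 ≤ (Nat.toDigits 2 n).length := by
  unfold Nat.toDigits
  rw [Nat.toDigitsCore]
  by_cases h0 : n / 2 = 0
  · simp [h0]
  · simp only [h0, if_false]
    rw [toDigitsCore_acc]
    simp

lemma prodA_eq_mulB (X Y : List (List Int)) : produit_matrice_2_2_ops X Y = pvMul2Ops X Y := rfl

-- the heart: A's recursion at ↑m equals B's MSB-first fold over the binary digits of m after the leading one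
lemma key (M : List (List Int)) (m : Nat) (h1 : 1 ≤ m) :
    puissance_matrice_2_2_ops M (m : Int) =
      ((Nat.toDigits 2 m).drop 1).foldl (pvStep M) (M, 0) := by
  induction m using Nat.strong_induction_on with
  | _ m ih =>
    by_cases hm1 : m = 1
    · subst hm1
      have : Nat.toDigits 2 1 = ['1'] := rfl
      rw [this]
      simp [puissance_matrice_2_2_ops]
    · have hm2 : 2 ≤ m := by omega
      have hfd : PySem.Int.floordiv (m : Int) 2 = ((m / 2 : Nat) : Int) := by
        exact_mod_cast PySem.Int.floordiv_natCast m 2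
      have hmd : PySem.Int.mod (m : Int) 2 = ((m % 2 : Nat) : Int) := by
        exact_mod_cast PySem.Int.mod_natCast m 2
      rw [toDigits_two_rec m hm2,
          List.drop_append_of_le_length (toDigits_two_length_pos (m / 2)),
          List.foldl_append]
      rw [← ih (m / 2) (by omega) (by omega)]
      rw [puissance_matrice_2_2_ops]
      have c0 : ¬ ((m : Int) = 0) := by omega
      have c1 : ¬ ((m : Int) = 1) := by omega
      have c2 : ¬ ((m : Int) < 0) := by omega
      simp only [c0, c1, c2, if_false, hfd, hmd]
      set p := puissance_matrice_2_2_ops M ((m / 2 : Nat) : Int) with hp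
      rcases Nat.mod_two_eq_zero_or_one m with he | ho
      · have : ((m % 2 : Nat) : Int) = 0 := by omega
        rw [this]
        have hd : Nat.digitChar (m % 2) = '0' := by rw [he]; rfl
        simp [hd, pvStep, prodA_eq_mulB]
      · have : ¬ (((m % 2 : Nat) : Int) = 0) := by omega
        rw [if_neg this]
        have hd : Nat.digitChar (m % 2) = '1' := by rw [ho]; rfl
        rw [hd]
        simp only [List.foldl_cons, List.foldl_nil, pvStep, prodA_eq_mulB]
        refine Prod.ext rfl ?_
        show (12 : Int) + 12 + p.2 = p.2 + 12 + 12
        ring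

-- ===== VERDICT (by name: the statement is the Claim_ definition above) =====
theorem puissance_matrice_2_2_ops_spec : Claim_equal_puissance_matrice_2_2_ops := by
  intro M n _ hpre
  unfold Spec_puissance_matrice_2_2_ops
  by_cases h0 : n = 0
  · subst h0
    simp [puissance_matrice_2_2_ops, puissance_matrice_2_2_ops_alt]
  · have hn0 : 0 ≤ n := hpre.1
    obtain ⟨m, rfl⟩ : ∃ m : Nat, n = (m : Int) := ⟨n.toNat, by omega⟩
    have hm1 : 1 ≤ m := by omega
    rw [key M m hm1, puissance_matrice_2_2_ops_alt, if_neg h0]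
    rw [PySem.Int.toBinChars0b, if_neg (by omega : ¬ ((m : Int) < 0))]
    simp only [Int.toNat_natCast]
    have hslice : PySem.List.slice ('0' :: 'b' :: Nat.toDigits 2 m) (some 3) none
        = (Nat.toDigits 2 m).drop 1 := by
      have := PySem.List.slice_from_natCast ('0' :: 'b' :: Nat.toDigits 2 m) 3
      simpa using this
    rw [hslice]
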